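-- pv_equiv track=rewrite | github.com/samuelhurtado20/py-battleship | app/main.py | _generate_ship_coords
-- ===== SOURCE A (Python) =====
-- def _generate_ship_coords(
--
--     start: tuple[int, int],
--     end: tuple[int, int]
-- ) -> list[tuple[int, int]]:
--     row_start, col_start = start
--     row_end, col_end = end
--
--     if row_start != row_end and col_start != col_end:
--         raise ValueError("Ships must be straight lines!")
--
--     coords = []
--     for row in range(min(row_start, row_end), max(row_start, row_end) + 1):
--         for col in range(
--             min(col_start, col_end),
--             max(col_start, col_end) + 1
--         ):
--             if not (0 <= row <= 9 and 0 <= col <= 9):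
--                 raise ValueError("Ship coordinates out of bounds!")
--             coords.append((row, col))
--     return coords
-- ===== SOURCE B (Python) =====
-- def _generate_ship_coords(
--     start: tuple[int, int],
--     end: tuple[int, int]
-- ) -> list[tuple[int, int]]:
--     if start[0] != end[0] and start[1] != end[1]:
--         raise ValueError("Ships must be straight lines!")
--
--     base = (min(start[0], end[0]), min(start[1], end[1]))
--     step = (1, 0) if start[0] != end[0] else (0, 1)
--     length = max(abs(end[0] - start[0]), abs(end[1] - start[1])) + 1
--
--     coords = []
--     for i in range(length):
--         cell = (base[0] + step[0] * i, base[1] + step[1] * i)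
--         if not (0 <= cell[0] <= 9 and 0 <= cell[1] <= 9):
--             raise ValueError("Ship coordinates out of bounds!")
--         coords.append(cell)
--     return coords
-- ===== Notes on version B (the rewrite author's own statement) =====
-- stated objective: simpler
-- what changed: Replaces A's nested double range loop (one axis of which is always degenerate) with a single line-walking pass: base cell = componentwise min, a unit step along the varying axis, and length = max axis span + 1.
import Mathlib
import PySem

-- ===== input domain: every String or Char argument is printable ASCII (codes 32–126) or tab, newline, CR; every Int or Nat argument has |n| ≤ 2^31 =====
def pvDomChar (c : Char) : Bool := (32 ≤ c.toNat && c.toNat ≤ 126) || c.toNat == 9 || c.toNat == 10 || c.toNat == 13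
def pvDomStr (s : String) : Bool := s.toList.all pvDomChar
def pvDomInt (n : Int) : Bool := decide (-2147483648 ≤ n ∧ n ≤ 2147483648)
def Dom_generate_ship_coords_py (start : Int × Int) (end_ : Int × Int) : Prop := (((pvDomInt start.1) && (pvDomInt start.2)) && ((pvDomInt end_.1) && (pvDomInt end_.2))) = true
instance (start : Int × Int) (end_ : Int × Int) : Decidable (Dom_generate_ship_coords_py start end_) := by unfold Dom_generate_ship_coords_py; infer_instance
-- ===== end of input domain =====

-- B replaces A's nested double range loop (one axis always degenerate) with a single
-- line-walking pass from the componentwise-min base cell; objective: simpler.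


-- ===== PORT A =====
-- On the branches where the Python raises ValueError the port returns the accumulator
-- unchanged / []; those inputs are excluded by Pre_generate_ship_coords_py.
def generate_ship_coords_py (start : Int × Int) (end_ : Int × Int) : List (Int × Int) :=
  let row_start := start.1; let col_start := start.2
  let row_end := end_.1; let col_end := end_.2
  if row_start ≠ row_end ∧ col_start ≠ col_end then []  -- raise "Ships must be straight lines!"
  else
    (PySem.List.pyRange (min row_start row_end) (max row_start row_end + 1) 1).foldl
      (fun coords row =>
        (PySem.List.pyRange (min col_start col_end) (max col_start col_end + 1) 1).foldl
          (fun coords2 col =>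
            if 0 ≤ row ∧ row ≤ 9 ∧ 0 ≤ col ∧ col ≤ 9 then coords2 ++ [(row, col)]
            else coords2)  -- raise "Ship coordinates out of bounds!"
          coords)
      []

-- ===== PORT B =====
def generate_ship_coords_py_alt (start : Int × Int) (end_ : Int × Int) : List (Int × Int) :=
  if start.1 ≠ end_.1 ∧ start.2 ≠ end_.2 then []  -- raise "Ships must be straight lines!"
  else
    let base : Int × Int := (min start.1 end_.1, min start.2 end_.2)
    let step : Int × Int := if start.1 ≠ end_.1 then (1, 0) else (0, 1)
    let length : Int := max |end_.1 - start.1| |end_.2 - start.2| + 1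
    (PySem.List.pyRange 0 length 1).foldl
      (fun coords i =>
        let cell := (base.1 + step.1 * i, base.2 + step.2 * i)
        if 0 ≤ cell.1 ∧ cell.1 ≤ 9 ∧ 0 ≤ cell.2 ∧ cell.2 ≤ 9 then coords ++ [cell]
        else coords)  -- raise "Ship coordinates out of bounds!"
      []

-- ===== PRECONDITION & SPEC =====
-- Pre_ excludes exactly the inputs on which A raises ValueError: bent ships and
-- straight ships with any cell outside the 10×10 board.
def Pre_generate_ship_coords_py (start : Int × Int) (end_ : Int × Int) : Prop :=
  (start.1 = end_.1 ∨ start.2 = end_.2) ∧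
  0 ≤ min start.1 end_.1 ∧ max start.1 end_.1 ≤ 9 ∧
  0 ≤ min start.2 end_.2 ∧ max start.2 end_.2 ≤ 9
instance (start : Int × Int) (end_ : Int × Int) : Decidable (Pre_generate_ship_coords_py start end_) := by unfold Pre_generate_ship_coords_py; infer_instance
def pvWitness_generate_ship_coords_py : (Int × Int) × (Int × Int) := ((2, 1), (2, 4))

def Spec_generate_ship_coords_py (start : Int × Int) (end_ : Int × Int) (out : List (Int × Int)) : Prop := out = generate_ship_coords_py_alt start end_
instance (start : Int × Int) (end_ : Int × Int) (out : List (Int × Int)) : Decidable (Spec_generate_ship_coords_py start end_ out) := by unfold Spec_generate_ship_coords_py; infer_instance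

-- ===== CLAIM (what is proved, stated in full; the proofs are below) =====
def Claim_equal_generate_ship_coords_py : Prop := ∀ (start : Int × Int) (end_ : Int × Int), Dom_generate_ship_coords_py start end_ → Pre_generate_ship_coords_py start end_ → Spec_generate_ship_coords_py start end_ (generate_ship_coords_py start end_)

-- ===== LEMMAS AND PROOFS =====

-- A conditional-append fold whose condition holds on every element is acc ++ map.
lemma foldl_push {α β : Type} (p : α → Prop) [DecidablePred p] (g : α → β) :
    ∀ (l : List α) (acc : List β), (∀ x ∈ l, p x) →
      l.foldl (fun a x => if p x then a ++ [g x] else a) acc = acc ++ l.map g := by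
  intro l
  induction l with
  | nil => simp
  | cons x xs ih =>
    intro acc h
    simp only [List.foldl_cons, List.map_cons]
    rw [if_pos (h x (List.mem_cons_self))]
    rw [ih _ (fun y hy => h y (List.mem_cons_of_mem _ hy))]
    simp

-- ===== VERDICT (by name: the statement is the Claim_ definition above) =====
theorem generate_ship_coords_py_spec : Claim_equal_generate_ship_coords_py := by
  intro start end_ _ hpre
  obtain ⟨r0, c0⟩ := start
  obtain ⟨r1, c1⟩ := end_
  obtain ⟨hstraight, h1, h2, h3, h4⟩ := hpre
  simp only at hstraight h1 h2 h3 h4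
  unfold Spec_generate_ship_coords_py generate_ship_coords_py generate_ship_coords_py_alt
  by_cases hr : r0 = r1
  · subst hr
    simp only [min_self, max_self] at h1 h2
    simp only [ne_eq, not_true_eq_false, false_and, if_false,
      min_self, max_self, sub_self, abs_zero]
    rw [PySem.List.pyRange_one_singleton, List.foldl_cons, List.foldl_nil]
    rw [foldl_push (fun col => 0 ≤ r0 ∧ r0 ≤ 9 ∧ 0 ≤ col ∧ col ≤ 9) (fun col => (r0, col))
        _ [] (by
          intro x hx
          rw [PySem.List.mem_pyRange_one] at hx
          omega)]
    rw [foldl_push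
        (fun i => 0 ≤ r0 + 0 * i ∧ r0 + 0 * i ≤ 9 ∧
                  0 ≤ min c0 c1 + 1 * i ∧ min c0 c1 + 1 * i ≤ 9)
        (fun i => (r0 + 0 * i, min c0 c1 + 1 * i))
        _ [] (by
          intro x hx
          rw [PySem.List.mem_pyRange_one] at hx
          rcases abs_cases (c1 - c0) with ⟨he, _⟩ | ⟨he, _⟩ <;> rw [he] at hx <;>
            refine ⟨by omega, by omega, by omega, by omega⟩)]
    rw [PySem.List.pyRange_one, PySem.List.pyRange_one]
    simp only [List.nil_append, List.map_map]
    have hlen : (max c0 c1 + 1 - min c0 c1).toNat = (max 0 |c1 - c0| + 1 - 0).toNat := by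
      rcases abs_cases (c1 - c0) with ⟨he, _⟩ | ⟨he, _⟩ <;> rw [he] <;> omega
    rw [hlen]
    apply List.map_congr_left
    intro k _
    simp only [Function.comp_apply]
    simp only [Prod.mk.injEq]
    constructor <;> ring
  · have hc : c0 = c1 := by tauto
    subst hc
    simp only [min_self, max_self] at h3 h4
    simp only [ne_eq, not_true_eq_false, and_false, if_false, if_pos hr,
      min_self, max_self, sub_self, abs_zero]
    rw [PySem.List.pyRange_one_singleton]
    have hinner : ∀ (coords : List (Int × Int)) (row : Int),
        List.foldl (fun coords2 col =>
            if 0 ≤ row ∧ row ≤ 9 ∧ 0 ≤ col ∧ col ≤ 9 then coords2 ++ [(row, col)] else coords2)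
          coords [c0]
        = (if 0 ≤ row ∧ row ≤ 9 ∧ 0 ≤ c0 ∧ c0 ≤ 9 then coords ++ [(row, c0)] else coords) := by
      intro coords row; simp [List.foldl]
    simp only [hinner]
    rw [foldl_push (fun row => 0 ≤ row ∧ row ≤ 9 ∧ 0 ≤ c0 ∧ c0 ≤ 9) (fun row => (row, c0))
        _ [] (by
          intro x hx
          rw [PySem.List.mem_pyRange_one] at hx
          omega)]
    rw [foldl_push
        (fun i => 0 ≤ min r0 r1 + 1 * i ∧ min r0 r1 + 1 * i ≤ 9 ∧
                  0 ≤ c0 + 0 * i ∧ c0 + 0 * i ≤ 9)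
        (fun i => (min r0 r1 + 1 * i, c0 + 0 * i))
        _ [] (by
          intro x hx
          rw [PySem.List.mem_pyRange_one] at hx
          rcases abs_cases (r1 - r0) with ⟨he, _⟩ | ⟨he, _⟩ <;> rw [he] at hx <;>
            refine ⟨by omega, by omega, by omega, by omega⟩)]
    rw [PySem.List.pyRange_one, PySem.List.pyRange_one]
    simp only [List.nil_append, List.map_map]
    have hlen : (max r0 r1 + 1 - min r0 r1).toNat = (max |r1 - r0| 0 + 1 - 0).toNat := by
      rcases abs_cases (r1 - r0) with ⟨he, _⟩ | ⟨he, _⟩ <;> rw [he] <;> omega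
    rw [hlen]
    apply List.map_congr_left
    intro k _
    simp only [Function.comp_apply]
    simp only [Prod.mk.injEq]
    constructor <;> ring
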